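-- pv_equiv track=rewrite | github.com/JMCinJiangSu/PharmReport | libs/hgvsp_To_hgvsp_abbr.py | splitAA
-- ===== SOURCE A (Python) =====
-- def splitAA(hgvs_p):
-- 	transAA = {
-- 		"A":"Ala",
-- 		"C":"Cys",
-- 		"D":"Asp",
-- 		"E":"Glu",
-- 		"F":"Phe",
-- 		"G":"Gly",
-- 		"H":"His",
-- 		"I":"Ile",
-- 		"K":"Lys",
-- 		"L":"Leu",
-- 		"M":"Met",
-- 		"N":"Asn",
-- 		"P":"Pro",
-- 		"Q":"Gln",
-- 		"R":"Arg",
-- 		"S":"Ser",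
-- 		"T":"Thr",
-- 		"V":"Val",
-- 		"W":"Trp",
-- 		"Y":"Tyr",
-- 		"*":"Ter"
-- 		}
-- #	AA_str = []
-- #	for i in list(hgvs_p):
-- #		if i in transAA.keys():
-- #			AA_str.append(transAA[i])
-- #		else:
-- #			AA_str.append(i)
-- #		hgvs_p_abbr = "".join(AA_str)
-- #	return hgvs_p_abbr
-- 	AA_str = []
-- 	for i in list(hgvs_p):
-- 		AA_str.append(transAA.get(i, i))
-- #	print (hgvs_p, "".join(AA_str))
-- 	return "".join(AA_str)
-- ===== SOURCE B (Python) =====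
-- def splitAA(hgvs_p):
--     # Staged global substitution: run one str.replace pass per amino-acid code over
--     # the whole string.  The order is dependency-safe: every key whose 3-letter code
--     # starts with a DIFFERENT capital letter (e.g. D -> "Asp" introduces 'A') comes
--     # after that letter's own pass, so an introduced capital is never re-replaced.
--     _PASSES = [
--         ("A", "Ala"), ("C", "Cys"), ("G", "Gly"), ("H", "His"), ("I", "Ile"),
--         ("L", "Leu"), ("M", "Met"), ("P", "Pro"), ("S", "Ser"), ("T", "Thr"),
--         ("V", "Val"),
--         ("D", "Asp"), ("E", "Glu"), ("F", "Phe"), ("K", "Lys"), ("N", "Asn"),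
--         ("Q", "Gln"), ("R", "Arg"), ("W", "Trp"), ("Y", "Tyr"), ("*", "Ter"),
--     ]
--     for one, three in _PASSES:
--         hgvs_p = hgvs_p.replace(one, three)
--     return hgvs_p
-- ===== Notes on version B (the rewrite author's own statement) =====
-- stated objective: faster
-- what changed: Replaced the single per-character dict-lookup-and-join pass with 21 staged whole-string str.replace passes, one per amino-acid code, ordered so that a capital letter introduced by a 3-letter code is never re-replaced by a later pass.
import Mathlib
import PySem

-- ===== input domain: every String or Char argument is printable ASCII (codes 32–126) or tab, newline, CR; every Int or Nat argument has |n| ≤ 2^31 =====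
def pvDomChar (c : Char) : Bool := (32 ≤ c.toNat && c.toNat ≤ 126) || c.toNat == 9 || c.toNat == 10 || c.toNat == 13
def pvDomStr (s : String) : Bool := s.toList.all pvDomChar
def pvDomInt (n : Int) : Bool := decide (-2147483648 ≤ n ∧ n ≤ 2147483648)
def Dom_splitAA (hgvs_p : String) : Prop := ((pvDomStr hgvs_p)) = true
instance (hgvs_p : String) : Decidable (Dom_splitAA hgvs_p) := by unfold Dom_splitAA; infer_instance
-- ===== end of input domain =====

set_option maxRecDepth 8000
set_option maxHeartbeats 1000000


-- B replaces A's single per-character dict-lookup pass by 21 staged whole-string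
-- replace passes in a dependency-safe order; alternative decomposition, same value.

-- ===== PORT A =====
-- A's literal dict  {"A":"Ala", …}  (keys are single characters → Char keys, exact)
def splitAA_transAA : PySem.Dict Char String :=
  PySem.Dict.ofList [('A',"Ala"), ('C',"Cys"), ('D',"Asp"), ('E',"Glu"), ('F',"Phe"),
    ('G',"Gly"), ('H',"His"), ('I',"Ile"), ('K',"Lys"), ('L',"Leu"), ('M',"Met"),
    ('N',"Asn"), ('P',"Pro"), ('Q',"Gln"), ('R',"Arg"), ('S',"Ser"), ('T',"Thr"),
    ('V',"Val"), ('W',"Trp"), ('Y',"Tyr"), ('*',"Ter")]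

def splitAA (hgvs_p : String) : String :=
  -- AA_str = []; for i in list(hgvs_p): AA_str.append(transAA.get(i, i)); return "".join(AA_str)
  let AA_str : List String :=
    hgvs_p.toList.foldl (fun acc i => acc ++ [splitAA_transAA.getD i (String.ofList [i])]) []
  PySem.Str.join "" AA_str

-- ===== PORT B =====
-- the 21 (one-letter, three-letter) passes, in Source B's dependency-safe order
def pvPasses : List (String × String) :=
  [("A","Ala"), ("C","Cys"), ("G","Gly"), ("H","His"), ("I","Ile"),
   ("L","Leu"), ("M","Met"), ("P","Pro"), ("S","Ser"), ("T","Thr"),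
   ("V","Val"),
   ("D","Asp"), ("E","Glu"), ("F","Phe"), ("K","Lys"), ("N","Asn"),
   ("Q","Gln"), ("R","Arg"), ("W","Trp"), ("Y","Tyr"), ("*","Ter")]

-- for one, three in _PASSES: hgvs_p = hgvs_p.replace(one, three); return hgvs_p
def splitAA_alt (hgvs_p : String) : String :=
  pvPasses.foldl (fun s p => PySem.Str.replace s p.1 p.2) hgvs_p

-- ===== PRECONDITION & SPEC =====
def Spec_splitAA (hgvs_p : String) (out : String) : Prop := out = splitAA_alt hgvs_p
instance (hgvs_p : String) (out : String) : Decidable (Spec_splitAA hgvs_p out) := by unfold Spec_splitAA; infer_instance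

-- ===== CLAIM (what is proved, stated in full; the proofs are below) =====
def Claim_equal_splitAA : Prop := ∀ (hgvs_p : String), Dom_splitAA hgvs_p → Spec_splitAA hgvs_p (splitAA hgvs_p)

-- ===== LEMMAS AND PROOFS =====

-- replace with a single-character pattern is a flatMap over the characters
theorem pv_replace_go_single (k : Char) (new : List Char) (l : List Char) :
    ∀ (fuel : Nat) (acc : List Char), l.length ≤ fuel →
      PySem.Chars.replace.go [k] new fuel l acc
        = acc.reverse ++ l.flatMap (fun c => if c = k then new else [c]) := by
  induction l with
  | nil =>
    intro fuel acc _
    cases fuel <;> simp [PySem.Chars.replace.go]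
  | cons c t ih =>
    intro fuel acc hle
    cases fuel with
    | zero => simp at hle
    | succ fuel =>
      by_cases hck : c = k
      · have hpre : List.isPrefixOf [k] (c :: t) = true := by
          simp [List.isPrefixOf, hck]
        rw [PySem.Chars.replace.go, if_pos hpre]
        simp only [List.length_cons] at hle
        rw [show List.drop (List.length [k]) (c :: t) = t by simp]
        rw [ih fuel (new.reverse ++ acc) (by omega)]
        simp [hck]
      · have hpre : List.isPrefixOf [k] (c :: t) = false := by
          simp [List.isPrefixOf]
          exact fun h => (hck h.symm).elim
        rw [PySem.Chars.replace.go, if_neg (by simp [hpre])]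
        simp only [List.length_cons] at hle
        rw [ih fuel (c :: acc) (by omega)]
        simp [hck]

theorem pv_replace_single (k : Char) (new cs : List Char) :
    PySem.Chars.replace cs [k] new = cs.flatMap (fun c => if c = k then new else [c]) := by
  rw [PySem.Chars.replace]
  simp only [List.isEmpty_cons]
  exact pv_replace_go_single k new cs cs.length [] (le_refl _)

-- a single-char replace distributes over append
theorem pv_replace_append (k : Char) (new xs ys : List Char) :
    PySem.Chars.replace (xs ++ ys) [k] new
      = PySem.Chars.replace xs [k] new ++ PySem.Chars.replace ys [k] new := by
  simp [pv_replace_single]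

-- every pass pattern in pvPasses is a single character
theorem pv_passes_single : ∀ p ∈ pvPasses, (p.1.toList).length = 1 := by decide

-- the staged passes distribute over append
theorem pv_fold_append (ps : List (String × String))
    (h : ∀ p ∈ ps, (p.1.toList).length = 1) (xs ys : List Char) :
    ps.foldl (fun l p => PySem.Chars.replace l p.1.toList p.2.toList) (xs ++ ys)
      = ps.foldl (fun l p => PySem.Chars.replace l p.1.toList p.2.toList) xs
        ++ ps.foldl (fun l p => PySem.Chars.replace l p.1.toList p.2.toList) ys := by
  induction ps generalizing xs ys with
  | nil => simp
  | cons p ps ih =>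
    obtain ⟨k, hk⟩ := List.length_eq_one_iff.mp (h p (List.mem_cons_self ..))
    rw [List.foldl_cons, List.foldl_cons, List.foldl_cons, hk, pv_replace_append]
    exact ih (fun q hq => h q (List.mem_cons_of_mem _ hq)) _ _

-- the result of running all passes on a single character
def pvStep (c : Char) : List Char :=
  pvPasses.foldl (fun l p => PySem.Chars.replace l p.1.toList p.2.toList) [c]

-- staged passes on a string = flatMap of the per-character result
theorem pv_fold_flatMap (cs : List Char) :
    pvPasses.foldl (fun l p => PySem.Chars.replace l p.1.toList p.2.toList) cs
      = cs.flatMap pvStep := by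
  induction cs with
  | nil =>
    show pvPasses.foldl _ [] = _
    decide
  | cons c t ih =>
    have : (c :: t) = [c] ++ t := rfl
    rw [this, pv_fold_append pvPasses pv_passes_single, ih]
    rfl

-- per printable character, the staged passes produce exactly A's lookup
theorem pv_step_fin : ∀ n : Fin 127, pvDomChar (Char.ofNat n.val) = true →
    pvStep (Char.ofNat n.val)
      = (splitAA_transAA.getD (Char.ofNat n.val) (String.ofList [Char.ofNat n.val])).toList := by
  decide

theorem pv_step_char (c : Char) (h : pvDomChar c = true) :
    pvStep c = (splitAA_transAA.getD c (String.ofList [c])).toList := by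
  have hlt : c.toNat < 127 := by
    simp [pvDomChar] at h
    omega
  have h' : pvDomChar (Char.ofNat (⟨c.toNat, hlt⟩ : Fin 127).val) = true := by
    simpa [Char.ofNat_toNat] using h
  have := pv_step_fin ⟨c.toNat, hlt⟩ h'
  simpa [Char.ofNat_toNat] using this

-- A's loop shape: foldl-append with singletons is a map
theorem pv_foldl_map (f : Char → String) (cs : List Char) (acc : List String) :
    cs.foldl (fun a i => a ++ [f i]) acc = acc ++ cs.map f := by
  induction cs generalizing acc with
  | nil => simp
  | cons c cs ih => simp [List.foldl, ih, List.append_assoc]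

theorem pv_join_eq (g : Char → String) (cs : List Char) :
    PySem.Str.join "" (cs.map g) = String.ofList (cs.flatMap (fun c => (g c).toList)) := by
  rw [← String.toList_inj, PySem.Str.toList_join]
  simp only [PySem.Chars.join, String.toList_empty, String.toList_ofList, List.map_map]
  induction cs with
  | nil => simp [List.intercalate]
  | cons c cs ih =>
    cases cs with
    | nil => simp [List.intercalate]
    | cons d ds => simp [List.intercalate] at ih ⊢; simp [ih]

-- the String-level foldl of Str.replace computes the Chars-level foldl
theorem pv_strfold_toList (ps : List (String × String)) (s : String) :
    (ps.foldl (fun s p => PySem.Str.replace s p.1 p.2) s).toList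
      = ps.foldl (fun l p => PySem.Chars.replace l p.1.toList p.2.toList) s.toList := by
  induction ps generalizing s with
  | nil => rfl
  | cons p ps ih => simp [List.foldl_cons, ih, PySem.Str.toList_replace]

theorem pv_flatMap_congr (cs : List Char) (h : ∀ c ∈ cs, pvDomChar c = true) :
    cs.flatMap pvStep
      = cs.flatMap (fun c => (splitAA_transAA.getD c (String.ofList [c])).toList) := by
  induction cs with
  | nil => simp
  | cons c t ih =>
    simp only [List.flatMap_cons]
    rw [pv_step_char c (h c (List.mem_cons_self ..)),
        ih (fun d hd => h d (List.mem_cons_of_mem _ hd))]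

-- ===== VERDICT (by name: the statement is the Claim_ definition above) =====
theorem splitAA_spec : Claim_equal_splitAA := by
  intro s hdom
  unfold Spec_splitAA splitAA splitAA_alt
  rw [pv_foldl_map, List.nil_append, pv_join_eq, ← String.toList_inj]
  rw [String.toList_ofList, pv_strfold_toList, pv_fold_flatMap]
  have h : ∀ c ∈ s.toList, pvDomChar c = true := by
    simpa [Dom_splitAA, pvDomStr, List.all_eq_true] using hdom
  exact (pv_flatMap_congr s.toList h).symm
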